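-- pv_equiv track=rewrite | github.com/belovmd/it-academy-python-spring | src/task_3.py | different_numbers
-- ===== SOURCE A (Python) =====
-- def different_numbers(lst1, lst2):
--     """Unique elements from each list unique for two lists
--
--     :param lst1: list with integers numbers
--     :param lst2: list with integers numbers
--     :return: number of unique elements from each list unique for two lists
--     """
--     dict_count = {}
--     for nmb in lst1 + lst2:
--         dict_count[nmb] = dict_count.get(nmb, 0) + 1
--     counter = 0
--     common_elements = {*lst1} & {*lst2}
--     for key, value in dict_count.items():
--         counter += 1 if value == 1 and key not in common_elements else 0
--     return counter
-- ===== SOURCE B (Python) =====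
-- def different_numbers(lst1, lst2):
--     """Count values that occur exactly once across both lists:
--     sort the concatenation and scan it once, counting runs of length 1."""
--     counter = 0
--     run_len = 0
--     prev = None
--     for x in sorted(lst1 + lst2):
--         if run_len > 0 and x == prev:
--             run_len += 1
--         else:
--             if run_len == 1:
--                 counter += 1
--             prev = x
--             run_len = 1
--     if run_len == 1:
--         counter += 1
--     return counter
-- ===== Notes on version B (the rewrite author's own statement) =====
-- stated objective: alternative
-- what changed: Replaces A's hash-count dict plus lst1/lst2 intersection set with a single sort of the concatenation followed by one linear run-length scan that counts runs of length 1.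
import Mathlib
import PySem

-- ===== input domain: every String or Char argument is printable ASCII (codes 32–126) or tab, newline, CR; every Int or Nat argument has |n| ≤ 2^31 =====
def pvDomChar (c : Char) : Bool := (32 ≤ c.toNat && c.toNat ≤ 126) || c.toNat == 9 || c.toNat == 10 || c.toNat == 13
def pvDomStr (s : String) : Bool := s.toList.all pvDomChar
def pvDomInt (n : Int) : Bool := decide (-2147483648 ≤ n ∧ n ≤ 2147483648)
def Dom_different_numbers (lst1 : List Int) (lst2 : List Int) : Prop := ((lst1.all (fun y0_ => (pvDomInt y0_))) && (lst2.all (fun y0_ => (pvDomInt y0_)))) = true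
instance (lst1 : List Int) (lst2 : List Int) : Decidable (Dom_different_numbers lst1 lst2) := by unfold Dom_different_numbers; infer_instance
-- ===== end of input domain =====

-- B replaces A's counting-dict + intersection-set with a sort-then-scan over runs (alternative decomposition, not claimed faster).

-- ===== PORT A =====
def different_numbers (lst1 : List Int) (lst2 : List Int) : Int :=
  let dict_count := (lst1 ++ lst2).foldl (fun d nmb => d.insert nmb (d.getD nmb (0 : Int) + 1)) PySem.Dict.empty
  let common_elements := PySem.Set.inter (PySem.Set.ofList lst1) (PySem.Set.ofList lst2)
  dict_count.items.foldl (fun counter kv => counter + if kv.2 = 1 ∧ kv.1 ∉ common_elements then 1 else 0) 0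

-- ===== PORT B =====
-- one step of Source B's loop over the sorted concatenation; state = (counter, run_len, prev)
def dnStep (st : Int × Int × Option Int) (x : Int) : Int × Int × Option Int :=
  if st.2.1 > 0 ∧ st.2.2 = some x then (st.1, st.2.1 + 1, st.2.2)
  else ((if st.2.1 = 1 then st.1 + 1 else st.1), 1, some x)

def different_numbers_alt (lst1 : List Int) (lst2 : List Int) : Int :=
  let st := (PySem.List.sorted (lst1 ++ lst2) (fun x => x) false).foldl dnStep (0, 0, none)
  if st.2.1 = 1 then st.1 + 1 else st.1

-- ===== PRECONDITION & SPEC =====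
def Spec_different_numbers (lst1 : List Int) (lst2 : List Int) (out : Int) : Prop := out = different_numbers_alt lst1 lst2
instance (lst1 : List Int) (lst2 : List Int) (out : Int) : Decidable (Spec_different_numbers lst1 lst2 out) := by unfold Spec_different_numbers; infer_instance

-- ===== CLAIM (what is proved, stated in full; the proofs are below) =====
def Claim_equal_different_numbers : Prop := ∀ (lst1 : List Int) (lst2 : List Int), Dom_different_numbers lst1 lst2 → Spec_different_numbers lst1 lst2 (different_numbers lst1 lst2)

-- ===== LEMMAS AND PROOFS =====

-- the common value both ports compute: number of distinct elements occurring exactly once in t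
def pvT (t : List Int) : Int := ((PySem.List.dedup t).countP (fun x => t.count x == 1) : Int)

lemma discard_eq_filter (s : List Int) (x : Int) : PySem.Set.discard s x = s.filter (fun z => z != x) := by
  simp [PySem.Set.discard, bne]

-- dedup commutes with filter
lemma dedup_filter (p : Int → Bool) (t : List Int) :
    PySem.List.dedup (t.filter p) = (PySem.List.dedup t).filter p := by
  induction t with
  | nil => rfl
  | cons x xs ih =>
    by_cases hp : p x
    · rw [List.filter_cons_of_pos hp]
      simp only [PySem.List.dedup_eq_ofList] at *
      rw [PySem.Set.ofList_cons, PySem.Set.ofList_cons, discard_eq_filter, discard_eq_filter,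
        List.filter_cons_of_pos hp, ih, List.filter_comm]
    · rw [List.filter_cons_of_neg hp]
      simp only [PySem.List.dedup_eq_ofList] at *
      rw [PySem.Set.ofList_cons, discard_eq_filter, List.filter_cons_of_neg hp, ih,
        ← List.filter_comm]
      symm
      apply List.filter_eq_self.mpr
      intro y hy
      simp only [List.mem_filter] at hy
      have : y ≠ x := fun h => by subst h; exact hp hy.2
      simp [this]

-- pvT only depends on the multiset of elements
lemma pvT_perm {s m : List Int} (h : s.Perm m) : pvT s = pvT m := by
  unfold pvT
  have hc : ∀ x : Int, s.count x = m.count x := fun x => h.count_eq x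
  have h1 : (PySem.List.dedup s).countP (fun x => s.count x == 1)
      = (PySem.List.dedup s).countP (fun x => m.count x == 1) := by
    apply List.countP_congr; intro a _; simp [hc a]
  have hperm : (PySem.List.dedup s).Perm (PySem.List.dedup m) := by
    apply (List.perm_ext_iff_of_nodup ?_ ?_).mpr
    · intro a; simp [h.mem_iff]
    · simp [PySem.List.dedup_eq_ofList]
    · simp [PySem.List.dedup_eq_ofList]
  rw [h1, hperm.countP_eq]

-- peeling the first element off pvT
lemma pvT_cons (x : Int) (t : List Int) :
    pvT (x :: t) = (if x ∉ t then 1 else 0) + pvT (t.filter (fun z => z != x)) := by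
  unfold pvT
  rw [dedup_filter]
  simp only [PySem.List.dedup_eq_ofList, PySem.Set.ofList_cons, discard_eq_filter]
  rw [List.countP_cons]
  have h1 : ((PySem.Set.ofList t).filter (fun z => z != x)).countP (fun y => (x :: t).count y == 1)
      = ((PySem.Set.ofList t).filter (fun z => z != x)).countP (fun y => (t.filter (fun z => z != x)).count y == 1) := by
    apply List.countP_congr
    intro a ha
    simp only [List.mem_filter, bne_iff_ne] at ha
    have hax : ¬ (x = a) := fun h => ha.2 h.symm
    simp [List.count_cons, List.count_filter, ha.2, hax]
  rw [h1]
  have h2 : ((x :: t).count x == 1) = decide (x ∉ t) := by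
    rw [List.count_cons_self]
    by_cases hx : x ∈ t
    · have : 0 < t.count x := List.count_pos_iff.mpr hx
      simp [hx]; omega
    · simp [hx, List.count_eq_zero_of_not_mem hx]
  rw [h2]
  by_cases hx : x ∈ t
  · simp [hx]
  · simp [hx]; push_cast; ring

-- A computes pvT of the concatenation
lemma A_eq (lst1 lst2 : List Int) : different_numbers lst1 lst2 = pvT (lst1 ++ lst2) := by
  unfold pvT
  simp only [different_numbers]
  show (List.foldl (fun (counter : Int) (kv : Int × Int) => counter +
      if kv.2 = 1 ∧ kv.1 ∉ PySem.Set.inter (PySem.Set.ofList lst1) (PySem.Set.ofList lst2) then 1 else 0) 0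
      (PySem.Dict.counter (lst1 ++ lst2)).items) = _
  rw [PySem.List.foldl_add, PySem.Dict.items_counter, List.map_map, zero_add]
  have hmap : (List.map
      ((fun kv : Int × Int => if kv.2 = 1 ∧ kv.1 ∉ (PySem.Set.ofList lst1).inter (PySem.Set.ofList lst2) then (1:Int) else 0) ∘
        fun k => (k, (List.count k (lst1 ++ lst2) : Int)))
      (PySem.Set.ofList (lst1 ++ lst2)))
      = List.map (fun k => if (List.count k (lst1 ++ lst2) == 1) = true then (1:Int) else 0)
          (PySem.Set.ofList (lst1 ++ lst2)) := by
    apply List.map_congr_left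
    intro k hk
    simp only [Function.comp_apply]
    by_cases h1 : List.count k (lst1 ++ lst2) = 1
    · have hnc : k ∉ (PySem.Set.ofList lst1).inter (PySem.Set.ofList lst2) := by
        intro hmem
        rw [PySem.Set.mem_inter, PySem.Set.mem_ofList, PySem.Set.mem_ofList] at hmem
        have l1 : 0 < lst1.count k := List.count_pos_iff.mpr hmem.1
        have l2 : 0 < lst2.count k := List.count_pos_iff.mpr hmem.2
        have hca : List.count k (lst1 ++ lst2) = List.count k lst1 + List.count k lst2 :=
          List.count_append ..
        omega
      have h1' : (List.count k (lst1 ++ lst2) : Int) = 1 := by exact_mod_cast h1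
      simp [h1, h1', hnc]
    · have h1' : ¬ (List.count k (lst1 ++ lst2) : Int) = 1 := by exact_mod_cast h1
      rw [if_neg (fun hc => h1' hc.1)]
      rw [List.count_append] at h1
      simp [h1]
  rw [hmap, PySem.List.sum_map_ite_one_zero]
  simp [PySem.List.dedup_eq_ofList]

-- the scan invariant of Source B's loop: mid-run state (c, k, some v), everything still to come is ≥ v
lemma dnAux (s : List Int) : s.Pairwise (· ≤ ·) → ∀ (v c k : Int), 1 ≤ k → (∀ x ∈ s, v ≤ x) →
    (if (s.foldl dnStep (c, k, some v)).2.1 = 1 then (s.foldl dnStep (c, k, some v)).1 + 1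
     else (s.foldl dnStep (c, k, some v)).1)
      = c + (if k = 1 ∧ v ∉ s then 1 else 0) + pvT (s.filter (fun z => z != v)) := by
  induction s with
  | nil =>
    intro _ v c k hk _
    simp only [List.foldl_nil, List.filter_nil, List.not_mem_nil, not_false_iff, and_true]
    have h0 : pvT ([] : List Int) = 0 := by decide
    rw [h0]
    by_cases h : k = 1 <;> simp [h]
  | cons x t ih =>
    intro hp v c k hk hge
    have hxt : ∀ y ∈ t, x ≤ y := (List.pairwise_cons.mp hp).1
    have hpt := (List.pairwise_cons.mp hp).2
    rw [List.foldl_cons]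
    by_cases hvx : v = x
    · subst hvx
      have hstep : dnStep (c, k, some v) v = (c, k + 1, some v) := by
        simp only [dnStep, and_true, reduceIte]
        rw [if_pos (by omega)]
      rw [hstep, ih hpt v c (k + 1) (by omega) (fun y hy => hge y (List.mem_cons_of_mem _ hy))]
      have h1 : ¬ (k + 1 = 1) := by omega
      have h2 : v ∈ v :: t := List.mem_cons_self ..
      rw [List.filter_cons]
      simp [h1, h2]
    · have hvlt : v < x := lt_of_le_of_ne (hge x (List.mem_cons_self ..)) hvx
      have hstep : dnStep (c, k, some v) x = ((if k = 1 then c + 1 else c), 1, some x) := by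
        simp only [dnStep]
        rw [if_neg]
        rintro ⟨-, h⟩
        exact hvx (Option.some.injEq .. ▸ h)
      rw [hstep, ih hpt x _ 1 le_rfl hxt]
      have hvnotin : v ∉ x :: t := by
        intro hm
        rcases List.mem_cons.mp hm with h | h
        · exact hvx h
        · exact absurd (hxt v h) (not_le.mpr hvlt)
      have hfilt : (x :: t).filter (fun z => z != v) = x :: t := by
        apply List.filter_eq_self.mpr
        intro y hy
        rcases List.mem_cons.mp hy with h | h
        · subst h; simp [(ne_of_lt hvlt).symm]
        · have : v < y := lt_of_lt_of_le hvlt (hxt y h)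
          simp [(ne_of_lt this).symm]
      rw [hfilt, pvT_cons]
      simp only [hvnotin, not_false_iff, and_true, true_and]
      by_cases hk1 : k = 1 <;> simp [hk1] <;> ring

-- the whole scan, from its initial state
lemma scan_eq (s : List Int) (hs : s.Pairwise (· ≤ ·)) :
    (if (s.foldl dnStep (0, 0, none)).2.1 = 1 then (s.foldl dnStep (0, 0, none)).1 + 1
     else (s.foldl dnStep (0, 0, none)).1) = pvT s := by
  cases s with
  | nil => decide
  | cons x t =>
    rw [List.foldl_cons]
    have hstep : dnStep (0, 0, none) x = (0, 1, some x) := by simp [dnStep]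
    have hxt : ∀ y ∈ t, x ≤ y := (List.pairwise_cons.mp hs).1
    rw [hstep, dnAux t (List.pairwise_cons.mp hs).2 x 0 1 le_rfl hxt, pvT_cons]
    simp

-- B computes pvT of the sorted concatenation
lemma B_eq (lst1 lst2 : List Int) :
    different_numbers_alt lst1 lst2 = pvT (PySem.List.sorted (lst1 ++ lst2) (fun x => x) false) := by
  simp only [different_numbers_alt]
  apply scan_eq
  exact PySem.List.sorted_pairwise (lst1 ++ lst2) (fun x => x)

-- ===== VERDICT (by name: the statement is the Claim_ definition above) =====
theorem different_numbers_spec : Claim_equal_different_numbers := by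
  intro lst1 lst2 _
  unfold Spec_different_numbers
  rw [A_eq, B_eq]
  exact (pvT_perm (PySem.List.sorted_perm (lst1 ++ lst2) (fun x => x) false)).symm
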